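-- pv_equiv track=rewrite | github.com/SV-97/SV-97.github.io | code/coins.py | func_it
-- ===== SOURCE A (Python) =====
-- cash_register = [10, 20, 50, 100, 200]
--
-- price = 200 # 2€ price
--
-- def func_it(paid):
--     out_coins = []
--     while paid > price:
--         out_coin = min(
--             filter(
--                 lambda pair: pair[0] >= 0,
--                 map(lambda coin: ((paid - price) - coin, coin), cash_register)
--                 ),
--             key=lambda m: m[0])[1]
--         out_coins.append(out_coin)
--         paid -= out_coin
--     return out_coins
-- ===== SOURCE B (Python) =====
-- def func_it(paid):
--     change = paid - 200
--     if change <= 0: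
--         return []
--     out = []
--     for coin in (200, 100, 50, 20, 10):
--         q, change = divmod(change, coin)
--         out += [coin] * q
--     if change:
--         raise ValueError("cannot make exact change")
--     return out
-- ===== Notes on version B (the rewrite author's own statement) =====
-- stated objective: simpler
-- what changed: Replaces the per-coin while-loop that rescans the register with a min/filter/map each iteration by a single descending pass over the denominations using divmod, appending each coin quotient-many times.
import Mathlib
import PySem

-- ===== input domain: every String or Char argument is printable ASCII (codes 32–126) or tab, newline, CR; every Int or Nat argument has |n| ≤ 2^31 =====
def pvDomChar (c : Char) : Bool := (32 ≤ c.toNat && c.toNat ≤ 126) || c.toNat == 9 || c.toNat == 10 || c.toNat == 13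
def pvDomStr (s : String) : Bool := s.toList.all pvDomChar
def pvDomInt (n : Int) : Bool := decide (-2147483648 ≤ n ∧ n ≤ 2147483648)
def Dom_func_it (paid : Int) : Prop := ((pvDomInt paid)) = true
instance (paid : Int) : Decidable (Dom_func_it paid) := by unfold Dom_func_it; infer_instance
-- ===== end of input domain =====

-- B replaces A's repeated min/filter/map scan (one coin per iteration) with a single
-- descending divmod pass over the denominations; objective: simpler.

-- ===== PORT A =====
-- A's while-loop, one fuel unit per iteration; fuel (paid-200).toNat is enough because every
-- iteration shrinks paid-200 by at least 10.  When the filtered list is empty Python's min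
-- raises ValueError; the PySem min? returns none there and the port stops (outside Pre_).
def func_it_go : Nat → Int → List Int → List Int
  | 0, _, out => out
  | fuel+1, paid, out =>
    if paid > 200 then
      match PySem.List.min?
          ((([10, 20, 50, 100, 200] : List Int).map
              (fun coin => ((paid - 200) - coin, coin))).filter
            (fun pair => decide (0 ≤ pair.1)))
          (fun m => m.1) with
      | some oc => func_it_go fuel (paid - oc.2) (out ++ [oc.2])
      | none => out
    else out

def func_it (paid : Int) : List Int := func_it_go (paid - 200).toNat paid []

-- ===== PORT B =====
-- Source B: change = paid - 200; for each coin descending, q, change = divmod(change, coin),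
-- out += [coin] * q; the final `raise` when change ≠ 0 has no value (outside Pre_).
def func_it_alt (paid : Int) : List Int :=
  let change := paid - 200
  if change ≤ 0 then []
  else
    (([200, 100, 50, 20, 10] : List Int).foldl
      (fun (s : List Int × Int) coin =>
        (s.1 ++ List.replicate (PySem.Int.floordiv s.2 coin).toNat coin,
         PySem.Int.mod s.2 coin))
      ([], change)).1

-- ===== PRECONDITION & SPEC =====
-- Pre_ excludes exactly the inputs where A raises ValueError (min of an empty sequence):
-- paid > 200 with a change not divisible by 10; B also raises ValueError there.
def Pre_func_it (paid : Int) : Prop := paid ≤ 200 ∨ (paid - 200) % 10 = 0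
instance (paid : Int) : Decidable (Pre_func_it paid) := by unfold Pre_func_it; infer_instance
def pvWitness_func_it : Int := (580)

def Spec_func_it (paid : Int) (out : List Int) : Prop := out = func_it_alt paid
instance (paid : Int) (out : List Int) : Decidable (Spec_func_it paid out) := by unfold Spec_func_it; infer_instance

-- ===== CLAIM (what is proved, stated in full; the proofs are below) =====
def Claim_equal_func_it : Prop := ∀ (paid : Int), Dom_func_it paid → Pre_func_it paid → Spec_func_it paid (func_it paid)

-- ===== LEMMAS AND PROOFS =====

-- the greedy change function both programs compute
def coinF (c : Int) : List Int :=
  if h2 : 200 ≤ c then 200 :: coinF (c - 200)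
  else if h1 : 100 ≤ c then 100 :: coinF (c - 100)
  else if h5 : 50 ≤ c then 50 :: coinF (c - 50)
  else if h20 : 20 ≤ c then 20 :: coinF (c - 20)
  else if h10 : 10 ≤ c then 10 :: coinF (c - 10)
  else []
  termination_by c.toNat
  decreasing_by all_goals omega

theorem coinF_of_neg (c : Int) (h : c < 10) : coinF c = [] := by
  rw [coinF, dif_neg (by omega), dif_neg (by omega), dif_neg (by omega),
    dif_neg (by omega), dif_neg (by omega)]

-- helper: the first minimal element of a list with a strictly-unique minimum key
theorem min_pick (L : List (Int × Int)) (w : Int × Int) (hw : w ∈ L)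
    (hstrict : ∀ y ∈ L, y ≠ w → w.1 < y.1) :
    PySem.List.min? L (fun m => m.1) = some w := by
  cases hmn : PySem.List.min? L (fun m => m.1) with
  | none =>
    rw [PySem.List.min?_eq_none_iff] at hmn
    subst hmn; cases hw
  | some m =>
    have hm := PySem.List.min?_mem hmn
    have hle := PySem.List.min?_isMin hmn w hw
    by_cases he : m = w
    · rw [he]
    · exact absurd (hstrict m hm he) (by simpa using hle)

-- A's min picks the largest denomination ≤ c (as the pair (c - C, C))
theorem min_step (c : Int) (h : 10 ≤ c) :
    PySem.List.min?
        ((([10, 20, 50, 100, 200] : List Int).map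
            (fun coin => (c - coin, coin))).filter
          (fun pair => decide (0 ≤ pair.1)))
        (fun m => m.1)
      = some (if 200 ≤ c then (c - 200, 200) else if 100 ≤ c then (c - 100, 100)
              else if 50 ≤ c then (c - 50, 50) else if 20 ≤ c then (c - 20, 20)
              else (c - 10, 10)) := by
  have d10 : decide ((0:Int) ≤ c - 10) = true := by simp; omega
  by_cases h2 : (200:Int) ≤ c
  · have d20 : decide ((0:Int) ≤ c - 20) = true := by simp; omega
    have d50 : decide ((0:Int) ≤ c - 50) = true := by simp; omega
    have d100 : decide ((0:Int) ≤ c - 100) = true := by simp; omega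
    have d200 : decide ((0:Int) ≤ c - 200) = true := by simp; omega
    rw [if_pos h2]
    simp only [List.map, List.filter, d10, d20, d50, d100, d200]
    apply min_pick
    · simp
    · intro y hy hne
      simp only [List.mem_cons, List.not_mem_nil, or_false] at hy
      rcases hy with rfl|rfl|rfl|rfl|rfl <;> simp_all
  · by_cases h1 : (100:Int) ≤ c
    · have d20 : decide ((0:Int) ≤ c - 20) = true := by simp; omega
      have d50 : decide ((0:Int) ≤ c - 50) = true := by simp; omega
      have d100 : decide ((0:Int) ≤ c - 100) = true := by simp; omega
      have d200 : decide ((0:Int) ≤ c - 200) = false := by simp; omega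
      rw [if_neg h2, if_pos h1]
      simp only [List.map, List.filter, d10, d20, d50, d100, d200]
      apply min_pick
      · simp
      · intro y hy hne
        simp only [List.mem_cons, List.not_mem_nil, or_false] at hy
        rcases hy with rfl|rfl|rfl|rfl <;> simp_all
    · by_cases h5 : (50:Int) ≤ c
      · have d20 : decide ((0:Int) ≤ c - 20) = true := by simp; omega
        have d50 : decide ((0:Int) ≤ c - 50) = true := by simp; omega
        have d100 : decide ((0:Int) ≤ c - 100) = false := by simp; omega
        have d200 : decide ((0:Int) ≤ c - 200) = false := by simp; omega
        rw [if_neg h2, if_neg h1, if_pos h5]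
        simp only [List.map, List.filter, d10, d20, d50, d100, d200]
        apply min_pick
        · simp
        · intro y hy hne
          simp only [List.mem_cons, List.not_mem_nil, or_false] at hy
          rcases hy with rfl|rfl|rfl <;> simp_all
      · by_cases h20 : (20:Int) ≤ c
        · have d20 : decide ((0:Int) ≤ c - 20) = true := by simp; omega
          have d50 : decide ((0:Int) ≤ c - 50) = false := by simp; omega
          have d100 : decide ((0:Int) ≤ c - 100) = false := by simp; omega
          have d200 : decide ((0:Int) ≤ c - 200) = false := by simp; omega
          rw [if_neg h2, if_neg h1, if_neg h5, if_pos h20]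
          simp only [List.map, List.filter, d10, d20, d50, d100, d200]
          apply min_pick
          · simp
          · intro y hy hne
            simp only [List.mem_cons, List.not_mem_nil, or_false] at hy
            rcases hy with rfl|rfl <;> simp_all
        · have d20 : decide ((0:Int) ≤ c - 20) = false := by simp; omega
          have d50 : decide ((0:Int) ≤ c - 50) = false := by simp; omega
          have d100 : decide ((0:Int) ≤ c - 100) = false := by simp; omega
          have d200 : decide ((0:Int) ≤ c - 200) = false := by simp; omega
          rw [if_neg h2, if_neg h1, if_neg h5, if_neg h20]
          simp only [List.map, List.filter, d10, d20, d50, d100, d200]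
          apply min_pick
          · simp
          · intro y hy hne
            rcases List.mem_singleton.mp hy with rfl
            exact absurd rfl hne

-- A's loop computes coinF of the change
theorem go_eq_coinF (fuel : Nat) :
    ∀ (paid : Int) (out : List Int), (paid - 200) % 10 = 0 → (paid - 200).toNat ≤ fuel →
      func_it_go fuel paid out = out ++ coinF (paid - 200) := by
  induction fuel with
  | zero =>
    intro paid out _ hf
    rw [coinF_of_neg _ (by omega)]
    simp [func_it_go]
  | succ n ih =>
    intro paid out hm hf
    by_cases hp : paid > 200
    · have h10 : (10:Int) ≤ paid - 200 := by omega
      rw [func_it_go, if_pos hp, min_step _ h10]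
      by_cases h2 : (200:Int) ≤ paid - 200
      · rw [if_pos h2]
        show func_it_go n (paid - 200) (out ++ [200]) = out ++ coinF (paid - 200)
        conv_rhs => rw [coinF]
        rw [dif_pos h2, ih _ _ (by omega) (by omega)]
        simp
      · rw [if_neg h2]
        by_cases h1 : (100:Int) ≤ paid - 200
        · rw [if_pos h1]
          show func_it_go n (paid - 100) (out ++ [100]) = out ++ coinF (paid - 200)
          conv_rhs => rw [coinF]
          rw [dif_neg (by omega : ¬ (200:Int) ≤ paid - 200), dif_pos h1,
            ih _ _ (by omega) (by omega),
            (by ring : paid - 100 - 200 = paid - 200 - 100)]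
          simp
        · rw [if_neg h1]
          by_cases h5 : (50:Int) ≤ paid - 200
          · rw [if_pos h5]
            show func_it_go n (paid - 50) (out ++ [50]) = out ++ coinF (paid - 200)
            conv_rhs => rw [coinF]
            rw [dif_neg (by omega : ¬ (200:Int) ≤ paid - 200),
              dif_neg (by omega : ¬ (100:Int) ≤ paid - 200), dif_pos h5,
              ih _ _ (by omega) (by omega),
              (by ring : paid - 50 - 200 = paid - 200 - 50)]
            simp
          · rw [if_neg h5]
            by_cases h20 : (20:Int) ≤ paid - 200
            · rw [if_pos h20]
              show func_it_go n (paid - 20) (out ++ [20]) = out ++ coinF (paid - 200)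
              conv_rhs => rw [coinF]
              rw [dif_neg (by omega : ¬ (200:Int) ≤ paid - 200),
                dif_neg (by omega : ¬ (100:Int) ≤ paid - 200),
                dif_neg (by omega : ¬ (50:Int) ≤ paid - 200), dif_pos h20,
                ih _ _ (by omega) (by omega),
                (by ring : paid - 20 - 200 = paid - 200 - 20)]
              simp
            · rw [if_neg h20]
              show func_it_go n (paid - 10) (out ++ [10]) = out ++ coinF (paid - 200)
              conv_rhs => rw [coinF]
              rw [dif_neg (by omega : ¬ (200:Int) ≤ paid - 200),
                dif_neg (by omega : ¬ (100:Int) ≤ paid - 200),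
                dif_neg (by omega : ¬ (50:Int) ≤ paid - 200),
                dif_neg (by omega : ¬ (20:Int) ≤ paid - 200),
                dif_pos (by omega : (10:Int) ≤ paid - 200),
                ih _ _ (by omega) (by omega),
                (by ring : paid - 10 - 200 = paid - 200 - 10)]
              simp
    · rw [func_it_go, if_neg hp, coinF_of_neg _ (by omega)]
      simp

-- B's divmod pass computes coinF of the change
theorem alt_eq_coinF (n : Nat) : ∀ (c : Int), c.toNat ≤ n → 0 ≤ c → c % 10 = 0 →
    (([200, 100, 50, 20, 10] : List Int).foldl
      (fun (s : List Int × Int) coin =>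
        (s.1 ++ List.replicate (PySem.Int.floordiv s.2 coin).toNat coin,
         PySem.Int.mod s.2 coin))
      ([], c)).1 = coinF c := by
  induction n with
  | zero =>
    intro c hc h0 _
    have : c = 0 := by omega
    subst this
    rw [coinF_of_neg _ (by omega)]
    decide
  | succ n ih =>
    intro c hc h0 hm
    have key : ∀ d : Int, 0 ≤ d →
        (([200, 100, 50, 20, 10] : List Int).foldl
          (fun (s : List Int × Int) coin =>
            (s.1 ++ List.replicate (PySem.Int.floordiv s.2 coin).toNat coin,
             PySem.Int.mod s.2 coin))
          ([], d)).1
        = List.replicate (d / 200).toNat 200 ++ List.replicate (d % 200 / 100).toNat 100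
          ++ List.replicate (d % 200 % 100 / 50).toNat 50
          ++ List.replicate (d % 200 % 100 % 50 / 20).toNat 20
          ++ List.replicate (d % 200 % 100 % 50 % 20 / 10).toNat 10 := by
      intro d _
      simp only [List.foldl,
        PySem.Int.floordiv_eq_ediv_of_pos (show (0:Int) < 200 by norm_num),
        PySem.Int.mod_eq_emod_of_pos (show (0:Int) < 200 by norm_num),
        PySem.Int.floordiv_eq_ediv_of_pos (show (0:Int) < 100 by norm_num),
        PySem.Int.mod_eq_emod_of_pos (show (0:Int) < 100 by norm_num),
        PySem.Int.floordiv_eq_ediv_of_pos (show (0:Int) < 50 by norm_num),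
        PySem.Int.mod_eq_emod_of_pos (show (0:Int) < 50 by norm_num),
        PySem.Int.floordiv_eq_ediv_of_pos (show (0:Int) < 20 by norm_num),
        PySem.Int.mod_eq_emod_of_pos (show (0:Int) < 20 by norm_num),
        PySem.Int.floordiv_eq_ediv_of_pos (show (0:Int) < 10 by norm_num),
        PySem.Int.mod_eq_emod_of_pos (show (0:Int) < 10 by norm_num)]
      simp [List.append_assoc]
    rw [key c h0]
    by_cases h2 : (200:Int) ≤ c
    · have e1 : (c / 200).toNat = ((c - 200) / 200).toNat + 1 := by omega
      have e2 : c % 200 = (c - 200) % 200 := by omega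
      rw [coinF, dif_pos h2, ← ih (c - 200) (by omega) (by omega) (by omega), key (c - 200) (by omega),
        e1, e2, List.replicate_succ]
      simp [List.append_assoc]
    · by_cases h1 : (100:Int) ≤ c
      · have e0 : (c / 200).toNat = 0 := by omega
        have e0' : c % 200 = c := by omega
        have f0 : ((c - 100) / 200).toNat = 0 := by omega
        have f0' : (c - 100) % 200 = c - 100 := by omega
        have e1 : (c / 100).toNat = ((c - 100) / 100).toNat + 1 := by omega
        have e2 : c % 100 = (c - 100) % 100 := by omega
        rw [coinF, dif_neg (by omega : ¬ (200:Int) ≤ c), dif_pos h1,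
          ← ih (c - 100) (by omega) (by omega) (by omega), key (c - 100) (by omega),
          e0, e0', f0, f0', e1, e2, List.replicate_succ]
        simp [List.append_assoc]
      · by_cases h5 : (50:Int) ≤ c
        · have e0 : (c / 200).toNat = 0 := by omega
          have e0' : c % 200 = c := by omega
          have e0b : (c / 100).toNat = 0 := by omega
          have e0b' : c % 100 = c := by omega
          have f0 : ((c - 50) / 200).toNat = 0 := by omega
          have f0' : (c - 50) % 200 = c - 50 := by omega
          have f0b : ((c - 50) / 100).toNat = 0 := by omega
          have f0b' : (c - 50) % 100 = c - 50 := by omega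
          have e1 : (c / 50).toNat = ((c - 50) / 50).toNat + 1 := by omega
          have e2 : c % 50 = (c - 50) % 50 := by omega
          rw [coinF, dif_neg (by omega : ¬ (200:Int) ≤ c), dif_neg (by omega : ¬ (100:Int) ≤ c),
            dif_pos h5, ← ih (c - 50) (by omega) (by omega) (by omega), key (c - 50) (by omega),
            e0, e0', e0b, e0b', f0, f0', f0b, f0b', e1, e2, List.replicate_succ]
          simp [List.append_assoc]
        · by_cases h20 : (20:Int) ≤ c
          · have e0 : (c / 200).toNat = 0 := by omega
            have e0' : c % 200 = c := by omega
            have e0b : (c / 100).toNat = 0 := by omega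
            have e0b' : c % 100 = c := by omega
            have e0c : (c / 50).toNat = 0 := by omega
            have e0c' : c % 50 = c := by omega
            have f0 : ((c - 20) / 200).toNat = 0 := by omega
            have f0' : (c - 20) % 200 = c - 20 := by omega
            have f0b : ((c - 20) / 100).toNat = 0 := by omega
            have f0b' : (c - 20) % 100 = c - 20 := by omega
            have f0c : ((c - 20) / 50).toNat = 0 := by omega
            have f0c' : (c - 20) % 50 = c - 20 := by omega
            have e1 : (c / 20).toNat = ((c - 20) / 20).toNat + 1 := by omega
            have e2 : c % 20 = (c - 20) % 20 := by omega
            rw [coinF, dif_neg (by omega : ¬ (200:Int) ≤ c), dif_neg (by omega : ¬ (100:Int) ≤ c),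
              dif_neg (by omega : ¬ (50:Int) ≤ c), dif_pos h20,
              ← ih (c - 20) (by omega) (by omega) (by omega), key (c - 20) (by omega),
              e0, e0', e0b, e0b', e0c, e0c', f0, f0', f0b, f0b', f0c, f0c', e1, e2,
              List.replicate_succ]
            simp [List.append_assoc]
          · by_cases h10 : (10:Int) ≤ c
            · have hce : c = 10 := by omega
              subst hce
              have hc10 : coinF 10 = [10] := by
                rw [coinF, dif_neg (by norm_num), dif_neg (by norm_num),
                  dif_neg (by norm_num), dif_neg (by norm_num), dif_pos (by norm_num),
                  coinF_of_neg _ (by norm_num)]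
              rw [hc10]
              decide
            · have : c = 0 := by omega
              subst this
              rw [coinF_of_neg _ (by omega)]
              decide

-- ===== VERDICT (by name: the statement is the Claim_ definition above) =====
theorem func_it_spec : Claim_equal_func_it := by
  intro paid _ hpre
  unfold Spec_func_it func_it func_it_alt
  by_cases hle : paid - 200 <= 0
  · have h0 : (paid - 200).toNat = 0 := by omega
    rw [h0, if_pos hle]
    rfl
  · rw [if_neg hle]
    have hm : (paid - 200) % 10 = 0 := by
      rcases hpre with h | h
      · omega
      · exact h
    rw [go_eq_coinF _ _ _ hm (le_refl _),
      alt_eq_coinF (paid - 200).toNat _ (le_refl _) (by omega) hm]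
    simp
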